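-- pv_equiv track=rewrite | github.com/italianreptar/PyWordle | wordle.py | mark_correct
-- ===== SOURCE A (Python) =====
-- from collections import defaultdict
--
-- def mark_correct(word, inword, guess):
--     r0 = lambda : 0
--     dd = defaultdict(r0)
--     for cc in word:
--         dd[cc] += 1
--     for ii, cc in enumerate(inword):
--             if word[ii] == cc:
--                 guess[ii] = 1
--                 dd[cc] -= 1
--
--     return guess, dd
-- ===== SOURCE B (Python) =====
-- from collections import defaultdict
--
-- def mark_correct(word, inword, guess):
--     # positions where the guess letter is exactly right (word[ii] raises, as in A,
--     # if inword is longer than word)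
--     greens = [ii for ii, cc in enumerate(inword) if word[ii] == cc]
--     for ii in greens:
--         guess[ii] = 1
--     # distinct letters of word in first-occurrence order
--     seen = []
--     for cc in word:
--         if cc not in seen:
--             seen.append(cc)
--     # closed-form count per distinct letter: occurrences minus green hits
--     dd = defaultdict(lambda: 0)
--     for cc in seen:
--         dd[cc] = word.count(cc) - sum(1 for ii in greens if inword[ii] == cc)
--     return guess, dd
-- ===== Notes on version B (the rewrite author's own statement) =====
-- stated objective: alternative
-- what changed: Replaces A's count-all-then-decrement mutation of a shared dict inside the matching loop by a decomposition: first collect the green positions, then compute each distinct letter's final count in closed form as word.count(c) minus its green hits.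
import Mathlib
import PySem

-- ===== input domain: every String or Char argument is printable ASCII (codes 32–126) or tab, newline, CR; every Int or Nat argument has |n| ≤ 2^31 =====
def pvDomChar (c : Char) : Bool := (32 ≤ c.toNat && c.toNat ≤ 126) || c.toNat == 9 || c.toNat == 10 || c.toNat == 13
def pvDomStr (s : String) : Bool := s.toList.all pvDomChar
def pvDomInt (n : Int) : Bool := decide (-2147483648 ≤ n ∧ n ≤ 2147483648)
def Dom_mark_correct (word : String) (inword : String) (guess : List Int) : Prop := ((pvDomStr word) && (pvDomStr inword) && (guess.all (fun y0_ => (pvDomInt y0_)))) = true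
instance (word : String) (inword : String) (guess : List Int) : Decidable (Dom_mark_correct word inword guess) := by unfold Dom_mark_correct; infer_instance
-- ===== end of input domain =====

-- B replaces A's count-all-then-decrement dict mutation inside the matching loop by a
-- decomposition: collect green positions first, then each distinct letter's final count in
-- closed form (both Pythons mutate `guess` in place identically; equivalence is about the return value).


-- ===== PORT A =====
-- dict keys are one-character strings in Python; the ports work with Char keys and wrap
-- each key with String.singleton when producing the returned association list.
def mark_correct (word : String) (inword : String) (guess : List Int) : List Int × (List (String × Int)) :=
  -- dd = defaultdict(r0); for cc in word: dd[cc] += 1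
  let w := word.toList
  let d0 : PySem.Dict Char Int := w.foldl (fun d c => d.insert c (d.getD c 0 + 1)) PySem.Dict.empty
  -- for ii, cc in enumerate(inword): if word[ii] == cc: guess[ii] = 1; dd[cc] -= 1
  let st := (PySem.List.enumerate inword.toList 0).foldl
    (fun (s : List Int × PySem.Dict Char Int) p =>
      if PySem.List.pyGetD w p.1 '\x00' == p.2 then
        (PySem.List.pySetD s.1 p.1 1, s.2.insert p.2 (s.2.getD p.2 0 - 1))
      else s)
    (guess, d0)
  (st.1, st.2.items.map (fun p => (String.singleton p.1, p.2)))

-- ===== PORT B =====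
def mark_correct_alt (word : String) (inword : String) (guess : List Int) : List Int × (List (String × Int)) :=
  let w := word.toList
  -- greens = [ii for ii, cc in enumerate(inword) if word[ii] == cc]
  let greens := ((PySem.List.enumerate inword.toList 0).filter
      (fun p => PySem.List.pyGetD w p.1 '\x00' == p.2)).map (·.1)
  -- for ii in greens: guess[ii] = 1
  let g := greens.foldl (fun g i => PySem.List.pySetD g i 1) guess
  -- seen = []; for cc in word: if cc not in seen: seen.append(cc)
  let seen := w.foldl (fun (s : List Char) c => if c ∈ s then s else s ++ [c]) []
  -- for cc in seen: dd[cc] = word.count(cc) - sum(1 for ii in greens if inword[ii] == cc)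
  let d := seen.foldl
    (fun (d : PySem.Dict Char Int) c =>
      d.insert c ((w.count c : Int) -
        (greens.countP (fun i => PySem.List.pyGetD inword.toList i '\x00' == c) : Int)))
    PySem.Dict.empty
  (g, d.items.map (fun p => (String.singleton p.1, p.2)))

-- ===== PRECONDITION & SPEC =====
-- Pre_ excludes exactly the inputs where the Python raises IndexError: inword longer than
-- word (word[ii]), or a green position at or beyond the end of guess (guess[ii] = 1).
def Pre_mark_correct (word : String) (inword : String) (guess : List Int) : Prop :=
  inword.toList.length ≤ word.toList.length ∧
  ∀ i < inword.toList.length, word.toList.getD i ' ' = inword.toList.getD i ' ' → i < guess.length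
instance (word : String) (inword : String) (guess : List Int) : Decidable (Pre_mark_correct word inword guess) := by unfold Pre_mark_correct; infer_instance
def pvWitness_mark_correct : String × String × List Int := ("crane", "cared", [0, 0, 0, 0, 0])

def Spec_mark_correct (word : String) (inword : String) (guess : List Int) (out : List Int × (List (String × Int))) : Prop := out = mark_correct_alt word inword guess
instance (word : String) (inword : String) (guess : List Int) (out : List Int × (List (String × Int))) : Decidable (Spec_mark_correct word inword guess out) := by unfold Spec_mark_correct; infer_instance

-- ===== CLAIM (what is proved, stated in full; the proofs are below) =====
def Claim_equal_mark_correct : Prop := ∀ (word : String) (inword : String) (guess : List Int), Dom_mark_correct word inword guess → Pre_mark_correct word inword guess → Spec_mark_correct word inword guess (mark_correct word inword guess)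

-- ===== LEMMAS AND PROOFS =====

-- A loop whose two accumulator components are updated independently under a state-free
-- condition is two loops over the filtered list.
theorem pv_split_fold {α β γ : Type} (l : List γ) (P : γ → Bool)
    (f1 : α → γ → α) (f2 : β → γ → β) (a : α) (b : β) :
    l.foldl (fun s p => if P p then (f1 s.1 p, f2 s.2 p) else s) (a, b)
      = ((l.filter P).foldl f1 a, (l.filter P).foldl f2 b) := by
  induction l generalizing a b with
  | nil => rfl
  | cons x xs ih =>
    simp only [List.foldl_cons, List.filter_cons]
    by_cases h : P x = true
    · simp [h, ih]
    · simp [h, ih]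

-- members of enumerate xs 0: the index is in range and names the paired element
theorem pv_mem_enumerate {α : Type} (xs : List α) (d : α) (s : Int) (hs : 0 ≤ s)
    (p : Int × α) (hp : p ∈ PySem.List.enumerate xs s) :
    s ≤ p.1 ∧ p.1 < s + xs.length ∧ PySem.List.pyGetD xs (p.1 - s) d = p.2 := by
  induction xs generalizing s with
  | nil => simp [PySem.List.enumerate_nil] at hp
  | cons x xs ih =>
    rw [PySem.List.enumerate_cons] at hp
    rcases List.mem_cons.1 hp with hp | hp
    · subst hp
      refine ⟨le_refl _, by simp only [List.length_cons]; push_cast; omega, ?_⟩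
      simp [PySem.List.pyGetD_zero_cons]
    · obtain ⟨h1, h2, h3⟩ := ih (s + 1) (by omega) hp
      refine ⟨by omega, by simp only [List.length_cons] at *; push_cast at h2 ⊢; omega, ?_⟩
      have hidx : p.1 - s = (p.1 - (s + 1)) + 1 := by omega
      have hnn : 0 ≤ p.1 - (s + 1) := by omega
      rw [hidx, ← h3]
      obtain ⟨k, hk⟩ := Int.eq_ofNat_of_zero_le hnn
      rw [hk]
      have : ((k : Int) + 1) = ((k + 1 : Nat) : Int) := by push_cast; ring
      rw [this, PySem.List.pyGetD_natCast, PySem.List.pyGetD_natCast]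
      simp

-- decrement loop on a dict: getD drops by the multiplicity in the list
theorem pv_getD_foldl_insert_sub_one (cs : List Char) (d : PySem.Dict Char Int) (v : Char) :
    (cs.foldl (fun d c => d.insert c (d.getD c 0 - 1)) d).getD v 0
      = d.getD v 0 - cs.count v := by
  induction cs generalizing d with
  | nil => simp
  | cons c cs ih =>
    simp only [List.foldl_cons, ih, PySem.Dict.getD_insert, List.count_cons]
    by_cases h : v = c
    · subst h
      simp only [beq_self_eq_true, if_true]
      push_cast
      ring
    · simp [h, Ne.symm h]

theorem pv_keys_foldl_insert_sub_one (cs : List Char) (d : PySem.Dict Char Int)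
    (h : ∀ c ∈ cs, c ∈ d.keys) :
    (cs.foldl (fun d c => d.insert c (d.getD c 0 - 1)) d).keys = d.keys := by
  rw [PySem.Dict.keys_foldl_insert]
  rw [PySem.Set.update_eq_append_filter]
  have : (PySem.Set.ofList cs).filter (fun y => !(PySem.Set.contains d.keys y)) = [] := by
    rw [List.filter_eq_nil_iff]
    intro c hc
    have hcc : c ∈ cs := (PySem.Set.mem_ofList cs c).1 hc
    simp [PySem.Set.contains_eq_listContains, h c hcc]
  rw [this, List.append_nil]

-- B's manual dedup loop is Set.ofList
theorem pv_seen_eq (w : List Char) :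
    w.foldl (fun (s : List Char) c => if c ∈ s then s else s ++ [c]) [] = PySem.Set.ofList w := by
  rw [PySem.Set.ofList_eq_foldl]
  congr 1
  funext s c
  rw [PySem.Set.add_eq_ite]

theorem mark_correct_eq (word : String) (inword : String) (guess : List Int)
    (_hdom : Dom_mark_correct word inword guess) (hpre : Pre_mark_correct word inword guess) :
    mark_correct word inword guess = mark_correct_alt word inword guess := by
  obtain ⟨hlen, _⟩ := hpre
  simp only [mark_correct, mark_correct_alt]
  set w := word.toList with hw
  set n := inword.toList with hn
  rw [pv_split_fold (PySem.List.enumerate n 0) (fun p => PySem.List.pyGetD w p.1 '\x00' == p.2)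
    (fun (g : List Int) (p : Int × Char) => PySem.List.pySetD g p.1 1)
    (fun (d : PySem.Dict Char Int) (p : Int × Char) => d.insert p.2 (d.getD p.2 0 - 1)) guess
    (w.foldl (fun d c => d.insert c (d.getD c 0 + 1)) PySem.Dict.empty)]
  set gl := (PySem.List.enumerate n 0).filter (fun p => PySem.List.pyGetD w p.1 '\x00' == p.2) with hgl
  have hglmem : ∀ p ∈ gl, p ∈ PySem.List.enumerate n 0 ∧ (PySem.List.pyGetD w p.1 '\x00' == p.2) = true := by
    intro p hp
    rw [hgl] at hp
    exact ⟨(List.mem_filter.1 hp).1, (List.mem_filter.1 hp).2⟩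
  -- every green pair's char is w[i] and lies in w; and pyGetD n i = p.2
  have hgreen : ∀ p ∈ gl, p.2 ∈ w ∧ PySem.List.pyGetD n p.1 '\x00' = p.2 := by
    intro p hp
    obtain ⟨hmem, hPp⟩ := hglmem p hp
    obtain ⟨h1, h2, h3⟩ := pv_mem_enumerate n '\x00' 0 (le_refl 0) p hmem
    simp only [Int.sub_zero] at h3
    have hPp' : PySem.List.pyGetD w p.1 '\x00' = p.2 := by
      simpa using hPp
    constructor
    · rw [← hPp']
      apply PySem.List.pyGetD_mem
      unfold PySem.Raise.InRange
      constructor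
      · omega
      · simp only [Int.zero_add] at h2
        have : (n.length : Int) ≤ (w.length : Int) := by exact_mod_cast hlen
        omega
    · exact h3
  dsimp only
  rw [Prod.mk.injEq]
  refine ⟨?_, ?_⟩
  · -- guess component
    rw [List.foldl_map]
  · -- dict component
    congr 1
    -- A side: counter w, then decrement per green char
    rw [PySem.Dict.foldl_insert_getD_add_one_eq_counter]
    set cs := gl.map (·.2) with hcs
    have hfold : gl.foldl (fun (d : PySem.Dict Char Int) p => d.insert p.2 (d.getD p.2 0 - 1)) (PySem.Dict.counter w)
        = cs.foldl (fun (d : PySem.Dict Char Int) c => d.insert c (d.getD c 0 - 1)) (PySem.Dict.counter w) := by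
      rw [hcs, List.foldl_map]
    rw [hfold]
    have hcsw : ∀ c ∈ cs, c ∈ (PySem.Dict.counter w).keys := by
      intro c hc
      rw [hcs] at hc
      obtain ⟨p, hp, hpc⟩ := List.mem_map.1 hc
      rw [PySem.Dict.keys_counter, PySem.Set.mem_ofList]
      rw [← hpc]
      exact (hgreen p hp).1
    have hkeysA := pv_keys_foldl_insert_sub_one cs (PySem.Dict.counter w) hcsw
    have hnodA : (cs.foldl (fun (d : PySem.Dict Char Int) c => d.insert c (d.getD c 0 - 1)) (PySem.Dict.counter w)).keys.Nodup := by
      rw [hkeysA]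
      exact PySem.Dict.nodup_keys_counter w
    rw [PySem.Dict.items_eq_map_keys _ hnodA 0, hkeysA, PySem.Dict.keys_counter]
    -- B side: fold of fresh inserts over seen
    rw [pv_seen_eq]
    have hB : (List.foldl (fun d c =>
          d.insert c ((List.count c w : Int) -
            (List.countP (fun i => PySem.List.pyGetD n i '\x00' == c) (List.map (fun x => x.1) gl) : Int)))
        PySem.Dict.empty (PySem.Set.ofList w)).items
        = (PySem.Set.ofList w).map (fun c => (c, (List.count c w : Int) -
            (List.countP (fun i => PySem.List.pyGetD n i '\x00' == c) (List.map (fun x => x.1) gl) : Int))) := by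
      have hfresh := PySem.Dict.items_foldl_insert_fresh (l := PySem.Set.ofList w) (k := fun c => c)
        (v := fun c => (List.count c w : Int) -
          (List.countP (fun i => PySem.List.pyGetD n i '\x00' == c) (List.map (fun x => x.1) gl) : Int))
        (d := PySem.Dict.empty) (by intro a _; simp) (by simp)
      simpa using hfresh
    rw [hB]
    apply List.map_congr_left
    intro c hc
    rw [pv_getD_foldl_insert_sub_one, PySem.Dict.getD_counter]
    simp only [Prod.mk.injEq, true_and]
    -- counts agree: greens' chars count = countP over green indices
    have hcnt : (List.countP (fun i => PySem.List.pyGetD n i '\x00' == c) (List.map (fun x => x.1) gl))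
        = cs.count c := by
      rw [List.countP_map, hcs, List.count_eq_countP, List.countP_map]
      apply List.countP_congr
      intro p hp
      have h2 := (hgreen p hp).2
      simp [Function.comp, h2]
    rw [hcnt]

-- ===== VERDICT (by name: the statement is the Claim_ definition above) =====
theorem mark_correct_spec : Claim_equal_mark_correct := by
  intro word inword guess hdom hpre
  unfold Spec_mark_correct
  exact mark_correct_eq word inword guess hdom hpre
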